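-- pv_equiv track=rewrite | github.com/Carglglz/asyncmd | aioschedule.py | tmdelta_fmt
-- ===== SOURCE A (Python) =====
-- def _dt_format(number):
--     n = str(number)
--     if len(n) == 1:
--         n = "0{}".format(n)
--         return n
--     else:
--         return n
--
-- def time_str(uptime_tuple):
--     upt = [_dt_format(i) for i in uptime_tuple[1:]]
--     up_str_1 = f"{uptime_tuple[0]} days, "
--     up_str_2 = f"{upt[0]}:{upt[1]}:{upt[2]}"
--     if uptime_tuple[0] > 0:
--         return up_str_1 + up_str_2
--     elif uptime_tuple[-2] > 0 or uptime_tuple[-3] > 0: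
--         return up_str_2
--     return f"{uptime_tuple[-1]} s"
--
-- def tmdelta_fmt(dt):
--     if dt < 0:
--         return f"the past by {tmdelta_fmt(abs(dt))} s"
--     dd, hh, mm, ss = (0, 0, 0, 0)
--     mm = dt // 60
--     ss = dt % 60
--     if mm:
--         pass
--     else:
--         return time_str((dd, hh, mm, ss))
--     hh = mm // 60
--     if hh:
--         mm = mm % 60
--     else:
--         return time_str((dd, hh, mm, ss))
--     dd = hh // 24
--     if dd:
--         hh = hh % 24
--     else:
--         return time_str((dd, hh, mm, ss))
--
--     return time_str((dd, hh, mm, ss))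
-- ===== SOURCE B (Python) =====
-- def tmdelta_fmt(dt):
--     # Non-recursive: branch on thresholds of |dt| directly, fields by direct division.
--     t = abs(dt)
--     if t < 60:
--         s = f"{t} s"
--     elif t < 86400:
--         s = f"{t // 3600:02d}:{t // 60 % 60:02d}:{t % 60:02d}"
--     else:
--         s = f"{t // 86400} days, {t // 3600 % 24:02d}:{t // 60 % 60:02d}:{t % 60:02d}"
--     return f"the past by {s} s" if dt < 0 else s
-- ===== Notes on version B (the rewrite author's own statement) =====
-- stated objective: simpler
-- what changed: Replaced A's recursive negative branch and successive guarded divmod decomposition with a non-recursive threshold branch on |dt| and direct field extraction (dt//86400, dt//3600%24, dt//60%60, dt%60) formatted in place.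
import Mathlib
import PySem

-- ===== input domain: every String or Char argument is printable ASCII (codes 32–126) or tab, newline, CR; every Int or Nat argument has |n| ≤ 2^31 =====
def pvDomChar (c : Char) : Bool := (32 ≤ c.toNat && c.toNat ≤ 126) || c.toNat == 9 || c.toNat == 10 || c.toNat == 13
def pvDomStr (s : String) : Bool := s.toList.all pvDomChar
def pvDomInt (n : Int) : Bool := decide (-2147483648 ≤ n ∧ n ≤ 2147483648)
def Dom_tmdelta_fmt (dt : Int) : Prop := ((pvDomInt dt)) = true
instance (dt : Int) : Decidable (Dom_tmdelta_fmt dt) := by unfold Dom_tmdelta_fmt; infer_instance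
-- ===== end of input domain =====

-- B replaces A's recursive negative branch and guarded successive-divmod decomposition
-- with a non-recursive threshold branch on |dt| and direct field extraction (objective: simpler).

-- ===== PORT A =====
-- _dt_format: str(number), pad with "0" if a single character
def pyDtFormatA (number : Int) : List Char :=
  let n := PySem.Int.toChars number
  if n.length == 1 then '0' :: n else n

-- time_str: takes the (dd, hh, mm, ss) tuple
def pyTimeStrA (dd hh mm ss : Int) : String :=
  let upt := [pyDtFormatA hh, pyDtFormatA mm, pyDtFormatA ss]
  let up_str_1 := PySem.Int.toChars dd ++ (" days, ".toList)
  let up_str_2 := upt[0]! ++ ':' :: upt[1]! ++ ':' :: upt[2]!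
  if dd > 0 then String.ofList (up_str_1 ++ up_str_2)
  else if mm > 0 ∨ hh > 0 then String.ofList up_str_2
  else String.ofList (PySem.Int.toChars ss ++ " s".toList)

def tmdelta_fmt (dt : Int) : String :=
  if dt < 0 then
    String.ofList ("the past by ".toList ++ (tmdelta_fmt |dt|).toList ++ " s".toList)
  else
    let mm := PySem.Int.floordiv dt 60
    let ss := PySem.Int.mod dt 60
    if mm ≠ 0 then
      let hh := PySem.Int.floordiv mm 60
      if hh ≠ 0 then
        let mm' := PySem.Int.mod mm 60
        let dd := PySem.Int.floordiv hh 24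
        if dd ≠ 0 then pyTimeStrA dd (PySem.Int.mod hh 24) mm' ss
        else pyTimeStrA dd hh mm' ss
      else pyTimeStrA 0 hh mm ss
    else pyTimeStrA 0 0 mm ss
termination_by (if dt < 0 then 1 else 0)
decreasing_by simp_all

-- ===== PORT B =====
-- "{:02d}".format(n): pad the decimal form to width 2 with '0'
def fmt02 (n : Int) : List Char :=
  let cs := PySem.Int.toChars n
  if cs.length < 2 then List.replicate (2 - cs.length) '0' ++ cs else cs

def tmdelta_fmt_alt (dt : Int) : String :=
  let t := |dt|
  let s : List Char :=
    if t < 60 then PySem.Int.toChars t ++ " s".toList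
    else if t < 86400 then
      fmt02 (PySem.Int.floordiv t 3600) ++ ':' ::
        fmt02 (PySem.Int.mod (PySem.Int.floordiv t 60) 60) ++ ':' ::
        fmt02 (PySem.Int.mod t 60)
    else
      PySem.Int.toChars (PySem.Int.floordiv t 86400) ++ " days, ".toList ++
        fmt02 (PySem.Int.mod (PySem.Int.floordiv t 3600) 24) ++ ':' ::
        fmt02 (PySem.Int.mod (PySem.Int.floordiv t 60) 60) ++ ':' ::
        fmt02 (PySem.Int.mod t 60)
  if dt < 0 then String.ofList ("the past by ".toList ++ s ++ " s".toList)
  else String.ofList s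

-- ===== PRECONDITION & SPEC =====
def Spec_tmdelta_fmt (dt : Int) (out : String) : Prop := out = tmdelta_fmt_alt dt
instance (dt : Int) (out : String) : Decidable (Spec_tmdelta_fmt dt out) := by unfold Spec_tmdelta_fmt; infer_instance

-- ===== CLAIM (what is proved, stated in full; the proofs are below) =====
def Claim_equal_tmdelta_fmt : Prop := ∀ (dt : Int), Dom_tmdelta_fmt dt → Spec_tmdelta_fmt dt (tmdelta_fmt dt)

-- ===== LEMMAS AND PROOFS =====

theorem pvToDigitsCore_len (b : Nat) : ∀ (f n : Nat) (ds : List Char), f ≠ 0 → ds.length < (Nat.toDigitsCore b f n ds).length := by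
  intro f
  induction f with
  | zero => intro n ds h; simp at h
  | succ f ih =>
    intro n ds _
    show ds.length < (if n / b = 0 then (n % b).digitChar :: ds else Nat.toDigitsCore b f (n / b) ((n % b).digitChar :: ds)).length
    by_cases h : n / b = 0
    · simp [h]
    · rw [if_neg h]
      rcases Nat.eq_zero_or_pos f with hf | hf
      · subst hf; simp [Nat.toDigitsCore]
      · exact lt_trans (by simp) (ih _ _ (by omega))

theorem pvToChars_ne_nil (n : Int) : PySem.Int.toChars n ≠ [] := by
  unfold PySem.Int.toChars
  split
  · simp
  · unfold Nat.toDigits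
    have := pvToDigitsCore_len 10 (n.toNat + 1) n.toNat [] (by omega)
    intro h; rw [h] at this; simp at this

-- {:02d} and _dt_format agree on every Int (decimal form is never empty)
theorem fmt02_eq_pyDtFormatA (n : Int) : fmt02 n = pyDtFormatA n := by
  unfold fmt02 pyDtFormatA
  have h : (PySem.Int.toChars n).length ≠ 0 := by
    simpa using pvToChars_ne_nil n
  rcases hl : (PySem.Int.toChars n).length with _ | _ | k <;> simp_all

theorem tmdelta_fmt_eq_alt_of_nonneg (dt : Int) (h : 0 ≤ dt) :
    tmdelta_fmt dt = tmdelta_fmt_alt dt := by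
  rw [tmdelta_fmt.eq_def, tmdelta_fmt_alt.eq_def]
  have h60 : (0:Int) < 60 := by norm_num
  have h24 : (0:Int) < 24 := by norm_num
  have h3600 : (0:Int) < 3600 := by norm_num
  have h86400 : (0:Int) < 86400 := by norm_num
  rw [if_neg (show ¬ dt < 0 from by omega)]
  simp only [abs_of_nonneg h, if_neg (show ¬ dt < 0 from by omega)]
  simp only [PySem.Int.floordiv_eq_ediv_of_pos h60, PySem.Int.mod_eq_emod_of_pos h60,
    PySem.Int.floordiv_eq_ediv_of_pos h24, PySem.Int.mod_eq_emod_of_pos h24,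
    PySem.Int.floordiv_eq_ediv_of_pos h3600,
    PySem.Int.floordiv_eq_ediv_of_pos h86400]
  by_cases h1 : dt < 60
  · rw [if_pos h1]
    have hm : dt / 60 = 0 := by omega
    have hs : dt % 60 = dt := by omega
    rw [hm, hs]
    norm_num [pyTimeStrA]
  · rw [if_neg h1]
    have hmne : dt / 60 ≠ 0 := by omega
    rw [if_pos hmne]
    by_cases h2 : dt < 86400
    · rw [if_pos h2]
      by_cases h3 : dt < 3600
      · -- hh = 0 branch in A
        have hh0 : dt / 60 / 60 = 0 := by omega
        have hh0' : dt / 3600 = 0 := by omega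
        have hmlt : dt / 60 % 60 = dt / 60 := by omega
        rw [if_neg (show ¬ dt / 60 / 60 ≠ 0 from by omega), hh0, hh0', hmlt]
        simp only [pyTimeStrA, fmt02_eq_pyDtFormatA]
        rw [if_neg (show ¬ (0:Int) > 0 from by omega),
          if_pos (Or.inl (show (0:Int) < dt / 60 from by omega))]
        simp
      · -- hh ≠ 0, dd = 0 branch in A
        have hhne : dt / 60 / 60 ≠ 0 := by omega
        have hdd : dt / 60 / 60 / 24 = 0 := by omega
        have hhe : dt / 60 / 60 = dt / 3600 := by omega
        rw [if_pos hhne, hdd, if_neg (show ¬ (0:Int) ≠ 0 from by omega), hhe]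
        simp only [pyTimeStrA, fmt02_eq_pyDtFormatA]
        rw [if_neg (show ¬ (0:Int) > 0 from by omega),
          if_pos (Or.inr (show (0:Int) < dt / 3600 from by omega))]
        simp
    · -- dd ≠ 0 branch in A
      rw [if_neg (show ¬ dt < 86400 from h2)]
      have hhne : dt / 60 / 60 ≠ 0 := by omega
      have hddne : dt / 60 / 60 / 24 ≠ 0 := by omega
      have hdd : dt / 60 / 60 / 24 = dt / 86400 := by omega
      have hhh : dt / 60 / 60 % 24 = dt / 3600 % 24 := by omega
      rw [if_pos hhne, if_pos hddne, hdd, hhh]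
      simp only [pyTimeStrA, fmt02_eq_pyDtFormatA]
      rw [if_pos (show (0:Int) < dt / 86400 from by omega)]
      simp

theorem tmdelta_fmt_alt_neg (dt : Int) (h : dt < 0) :
    tmdelta_fmt_alt dt =
      String.ofList ("the past by ".toList ++ (tmdelta_fmt_alt |dt|).toList ++ " s".toList) := by
  conv_rhs => rw [tmdelta_fmt_alt.eq_def]
  rw [tmdelta_fmt_alt.eq_def]
  simp only [abs_abs, if_pos h, if_neg (not_lt.mpr (abs_nonneg dt))]
  simp

-- ===== VERDICT (by name: the statement is the Claim_ definition above) =====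
theorem tmdelta_fmt_spec : Claim_equal_tmdelta_fmt := by
  intro dt _
  unfold Spec_tmdelta_fmt
  by_cases h : dt < 0
  · rw [tmdelta_fmt.eq_def, if_pos h,
      tmdelta_fmt_eq_alt_of_nonneg |dt| (abs_nonneg dt), tmdelta_fmt_alt_neg dt h]
  · exact tmdelta_fmt_eq_alt_of_nonneg dt (by omega)
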